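-- pv_equiv track=rewrite | github.com/affanaslam/hello-world | ct1/programs/lab5.py | Sort_codes
-- ===== SOURCE A (Python) =====
-- def Sort_codes(n):
--     '''Input = Dict of codes \n Output = Sorted order of input relative to i,k k value'''
--     n=dict_to_list(n)
--     Sorted=[]
--     n=list_to_dict(n)
--     n=key_to_item(n)
--     CodeS = sorted(n.keys(),key=len)
--     for i in CodeS:
--         for j,k in n.items():
--             if i==j:
--                 Sorted.append((k,i))
--     return Sorted
--
-- def key_to_item(n):
--
--     ''' input = dict{ i : k } \n
--     output = dict { k : i }'''
--
--     new={}
--     for i,k in n.items():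
--         new[k]=i
--     return new
--
-- def dict_to_list(n):
--
--     '''Input= dict{ i : k ....} \n
--     Output = List --> [(i,k)....]'''
--
--     l=[]
--     for i,k in n.items():
--         l.append((i,k))
--     return l
--
-- def list_to_dict(n):
--
--     '''Input = List-->[(i,k),...]\n
--     Output = dict{ i,k ,...}'''
--
--     d={}
--     for i,k in n:
--         d[i]=k
--     return d
-- ===== SOURCE B (Python) =====
-- def Sort_codes(n):
--     '''Same output as A, by bucket sort: group the swapped pairs by code length,
--     then emit the buckets in increasing length order (no comparison sort of the pairs).'''
--     last = {}
--     for i, k in n.items():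
--         last[k] = i
--     buckets = {}
--     for k, i in last.items():
--         buckets.setdefault(len(k), []).append((i, k))
--     out = []
--     for L in sorted(buckets):
--         out.extend(buckets[L])
--     return out
-- ===== Notes on version B (the rewrite author's own statement) =====
-- stated objective: faster
-- what changed: A comparison-sorts the swapped dict's keys by length and then rescans the whole item list once per key (nested sort-then-scan); B instead bucket-sorts: it groups the swapped pairs into a dict of buckets keyed by code length in one pass and emits the buckets in increasing length order.
import Mathlib
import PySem

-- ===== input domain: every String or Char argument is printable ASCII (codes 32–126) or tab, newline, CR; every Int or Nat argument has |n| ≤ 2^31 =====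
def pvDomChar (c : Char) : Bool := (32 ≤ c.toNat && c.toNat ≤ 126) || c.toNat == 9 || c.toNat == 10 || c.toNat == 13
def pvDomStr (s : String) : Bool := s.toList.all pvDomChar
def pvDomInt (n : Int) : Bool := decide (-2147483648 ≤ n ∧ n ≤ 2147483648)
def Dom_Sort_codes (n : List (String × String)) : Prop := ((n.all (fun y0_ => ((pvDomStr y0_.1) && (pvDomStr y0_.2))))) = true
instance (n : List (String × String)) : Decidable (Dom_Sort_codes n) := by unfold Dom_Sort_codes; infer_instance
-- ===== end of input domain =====

-- B replaces A's comparison sort of the keys plus a full rescan of the items for every key by a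
-- bucket sort: the swapped pairs are grouped by code length and the buckets are emitted in
-- increasing length order.

-- ===== PORT A =====
-- dict parameter: the association list is marshalled through PySem.Dict.ofList (Python dict semantics)
def pvDictToList (d : PySem.Dict String String) : List (String × String) :=
  d.items.foldl (fun l p => l ++ [p]) []

def pvListToDict (l : List (String × String)) : PySem.Dict String String :=
  l.foldl (fun d p => d.insert p.1 p.2) PySem.Dict.empty

def pvKeyToItem (d : PySem.Dict String String) : PySem.Dict String String :=
  d.items.foldl (fun new p => new.insert p.2 p.1) PySem.Dict.empty

def Sort_codes (n : List (String × String)) : List (String × String) :=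
  let n1 := pvDictToList (PySem.Dict.ofList n)
  let n2 := pvListToDict n1
  let n3 := pvKeyToItem n2
  let codeS := PySem.List.sorted n3.keys (fun s => PySem.Str.len s) false
  codeS.foldl (fun Sorted i =>
    n3.items.foldl (fun S p => if i == p.1 then S ++ [(p.2, i)] else S) Sorted) []

-- ===== PORT B =====
def Sort_codes_alt (n : List (String × String)) : List (String × String) :=
  let d := PySem.Dict.ofList n
  let last := d.items.foldl (fun sw p => sw.insert p.2 p.1) PySem.Dict.empty
  let buckets : PySem.Dict Int (List (String × String)) :=
    last.items.foldl (fun b p => b.modify (PySem.Str.len p.1) [] (fun v => v ++ [(p.2, p.1)])) PySem.Dict.empty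
  (PySem.List.sorted buckets.keys (fun L => L) false).foldl (fun out L => out ++ buckets.getD L []) []

-- ===== PRECONDITION & SPEC =====
def Spec_Sort_codes (n : List (String × String)) (out : List (String × String)) : Prop := out = Sort_codes_alt n
instance (n : List (String × String)) (out : List (String × String)) : Decidable (Spec_Sort_codes n out) := by unfold Spec_Sort_codes; infer_instance

-- ===== CLAIM (what is proved, stated in full; the proofs are below) =====
def Claim_equal_Sort_codes : Prop := ∀ (n : List (String × String)), Dom_Sort_codes n → Spec_Sort_codes n (Sort_codes n)

-- ===== LEMMAS AND PROOFS =====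

-- A's round trip dict → list → dict is the identity on a genuine dict.
theorem pvRoundTrip (n : List (String × String)) :
    pvListToDict (pvDictToList (PySem.Dict.ofList n)) = PySem.Dict.ofList n := by
  apply PySem.Dict.ext
  unfold pvListToDict pvDictToList
  rw [PySem.List.foldl_append_singleton]
  simp only [List.nil_append]
  rw [PySem.Dict.items_foldl_insert_fresh (PySem.Dict.ofList n).items Prod.fst Prod.snd
      PySem.Dict.empty (by intro a _; exact PySem.Dict.contains_empty _)
      (by simpa [PySem.Dict.keys] using PySem.Dict.nodup_keys_ofList n)]
  simp [PySem.Dict.empty]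

-- in a list with distinct first components, filtering on one key keeps exactly its pair.
theorem pvFilterFst {κ ν : Type} [BEq κ] [LawfulBEq κ] (l : List (κ × ν))
    (hn : (l.map Prod.fst).Nodup) (i : κ) (w : ν) (h : (i, w) ∈ l) :
    l.filter (fun p => i == p.1) = [(i, w)] := by
  induction l with
  | nil => cases h
  | cons a t ih =>
    simp only [List.map_cons, List.nodup_cons] at hn
    rcases List.mem_cons.mp h with h1 | h1
    · subst h1
      simp only [List.filter_cons, BEq.rfl, if_pos]
      simp only [List.cons.injEq, true_and]
      apply List.filter_eq_nil_iff.mpr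
      intro p hp hbe
      exact hn.1 (List.mem_map.mpr ⟨p, hp, (eq_of_beq hbe).symm⟩)
    · have hne : (i == a.1) = false := by
        apply beq_eq_false_iff_ne.mpr
        intro he
        have hmem : i ∈ List.map Prod.fst t := List.mem_map.mpr ⟨(i, w), h1, rfl⟩
        exact hn.1 (he ▸ hmem)
      simp only [List.filter_cons, hne, if_neg, Bool.false_eq_true, not_false_iff]
      exact ih hn.2 h1

-- STABILITY, one insertion: inserting x into a key-sorted list appends x at the end of its key level.
theorem pvInsertByFilter {α : Type} (key : α → Int) (L : Int) (x : α) (ys : List α)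
    (hp : ys.Pairwise (fun a b => key a ≤ key b)) :
    (PySem.List.insertBy (fun a b => decide (key a < key b)) x ys).filter (fun y => key y == L) =
      ys.filter (fun y => key y == L) ++ (if key x == L then [x] else []) := by
  induction ys with
  | nil =>
    simp only [PySem.List.insertBy, List.filter, List.nil_append]
    by_cases h : key x == L <;> simp [h]
  | cons y ys ih =>
    rw [List.pairwise_cons] at hp
    rw [PySem.List.insertBy.eq_2]
    by_cases hlt : key x < key y
    · simp only [hlt, decide_true, if_pos]
      by_cases hxL : key x = L
      · have hnil : (y :: ys).filter (fun z => key z == L) = [] := by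
          apply List.filter_eq_nil_iff.mpr
          intro z hz
          have hyz : key y ≤ key z := by
            rcases List.mem_cons.mp hz with h1 | h1
            · exact h1 ▸ le_refl _
            · exact hp.1 z h1
          have : L < key z := lt_of_lt_of_le (hxL ▸ hlt) hyz
          simp [beq_iff_eq]
          omega
        rw [List.filter_cons_of_pos (by simp [hxL]), hnil]
        simp [hxL]
      · rw [List.filter_cons_of_neg (by simp [hxL])]
        simp [hxL]
    · simp only [hlt, decide_false, Bool.false_eq_true, if_neg, not_false_iff]
      rw [List.filter_cons, List.filter_cons, ih hp.2]
      by_cases hyL : key y == L <;> simp [hyL]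

-- STABILITY: one key level of the stable sort is the original filter at that level.
theorem pvSortedFilterKey {α : Type} (key : α → Int) (xs : List α) (L : Int) :
    (PySem.List.sorted xs key false).filter (fun x => key x == L) = xs.filter (fun x => key x == L) := by
  rw [PySem.List.sorted_eq_foldl_insertBy]
  suffices h : ∀ (acc : List α), acc.Pairwise (fun a b => key a ≤ key b) →
      (xs.foldl (fun acc x => PySem.List.insertBy (fun a b => decide (key a < key b)) x acc) acc).filter (fun x => key x == L) =
      acc.filter (fun x => key x == L) ++ xs.filter (fun x => key x == L) by
    simpa using h [] (by simp)
  induction xs with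
  | nil => intro acc _; simp
  | cons x t ih =>
    intro acc hacc
    simp only [List.foldl_cons]
    rw [ih _ (PySem.List.insertBy_pairwise_le key x acc hacc),
        pvInsertByFilter key L x acc hacc, List.filter_cons]
    by_cases hxL : key x == L <;> simp [hxL]

-- two key-sorted lists with the same elements at every key level are equal.
theorem pvUniq {α : Type} (key : α → Int) (l₁ : List α) : ∀ (l₂ : List α),
    l₁.Pairwise (fun a b => key a ≤ key b) → l₂.Pairwise (fun a b => key a ≤ key b) →
    (∀ L, l₁.filter (fun x => key x == L) = l₂.filter (fun x => key x == L)) →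
    l₁ = l₂ := by
  induction l₁ with
  | nil =>
    intro l₂ _ _ hf
    cases l₂ with
    | nil => rfl
    | cons b t₂ =>
      have := hf (key b)
      rw [List.filter_cons_of_pos (by simp)] at this
      simp at this
  | cons a t₁ ih =>
    intro l₂ h₁ h₂ hf
    cases l₂ with
    | nil =>
      have := hf (key a)
      rw [List.filter_cons_of_pos (by simp)] at this
      simp at this
    | cons b t₂ =>
      rw [List.pairwise_cons] at h₁ h₂
      have hkey : key a = key b := by
        rcases lt_trichotomy (key a) (key b) with h | h | h
        · exfalso
          have hL : List.filter (fun x => key x == key a) (b :: t₂) = [] := by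
            apply List.filter_eq_nil_iff.mpr
            intro z hz
            rcases List.mem_cons.mp hz with rfl | hz'
            · simp only [beq_iff_eq]; omega
            · have := h₂.1 z hz'
              simp only [beq_iff_eq]; omega
          have hthis := hf (key a)
          rw [hL, List.filter_cons_of_pos (by simp)] at hthis
          simp at hthis
        · exact h
        · exfalso
          have hL : List.filter (fun x => key x == key b) (a :: t₁) = [] := by
            apply List.filter_eq_nil_iff.mpr
            intro z hz
            rcases List.mem_cons.mp hz with rfl | hz'
            · simp only [beq_iff_eq]; omega
            · have := h₁.1 z hz'
              simp only [beq_iff_eq]; omega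
          have hthis := hf (key b)
          rw [hL, List.filter_cons_of_pos (by simp)] at hthis
          simp at hthis
      have hhead := hf (key a)
      rw [List.filter_cons_of_pos (by simp), List.filter_cons_of_pos (by simp [hkey])] at hhead
      have hab : a = b := (List.cons.injEq _ _ _ _ ▸ hhead).1
      have htails : ∀ L, t₁.filter (fun x => key x == L) = t₂.filter (fun x => key x == L) := by
        intro L
        have := hf L
        by_cases haL : key a = L
        · rw [List.filter_cons_of_pos (by simp [haL]), List.filter_cons_of_pos (by simp [← hkey, haL])] at this
          exact (List.cons.injEq _ _ _ _ ▸ this).2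
        · rwa [List.filter_cons_of_neg (by simp [haL]), List.filter_cons_of_neg (by simp [← hkey, haL])] at this
      rw [hab, ih t₂ h₁.2 h₂.2 htails]

-- the bucket concatenation is key-sorted.
theorem pvFlatMapPairwise {α : Type} (key : α → Int) (xs : List α) : ∀ (Bs : List Int),
    Bs.Pairwise (· < ·) →
    (Bs.flatMap (fun L => xs.filter (fun x => key x == L))).Pairwise (fun a b => key a ≤ key b) := by
  intro Bs hB
  induction Bs with
  | nil => simp
  | cons L Bs' ih =>
    rw [List.pairwise_cons] at hB
    rw [List.flatMap_cons]
    apply List.pairwise_append.mpr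
    refine ⟨?_, ih hB.2, ?_⟩
    · apply List.pairwise_of_forall_mem_list
      intro a ha b hb
      have ha' := (List.mem_filter.mp ha).2
      have hb' := (List.mem_filter.mp hb).2
      simp only [beq_iff_eq] at ha' hb'
      omega
    · intro a ha b hb
      have ha' := (List.mem_filter.mp ha).2
      rcases List.mem_flatMap.mp hb with ⟨L', hL', hb'⟩
      have hb'' := (List.mem_filter.mp hb').2
      have hLL' := hB.1 L' hL'
      simp only [beq_iff_eq] at ha' hb''
      omega

-- a key level of the bucket concatenation.
theorem pvFlatMapFilter {α : Type} (key : α → Int) (xs : List α) : ∀ (Bs : List Int),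
    Bs.Nodup → ∀ (M : Int),
    (Bs.flatMap (fun L => xs.filter (fun x => key x == L))).filter (fun x => key x == M) =
      if M ∈ Bs then xs.filter (fun x => key x == M) else [] := by
  intro Bs hB M
  induction Bs with
  | nil => simp
  | cons L Bs' ih =>
    rw [List.nodup_cons] at hB
    rw [List.flatMap_cons, List.filter_append, List.filter_filter]
    by_cases hML : M = L
    · subst hML
      have h1 : (xs.filter fun a => (key a == M) && (key a == M)) = xs.filter (fun a => key a == M) := by
        apply List.filter_congr; intro x _; simp [Bool.and_self]
      rw [h1, ih hB.2]
      simp [hB.1]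
    · have h1 : (xs.filter fun a => (key a == M) && (key a == L)) = [] := by
        apply List.filter_eq_nil_iff.mpr
        intro z _
        simp only [Bool.and_eq_true, beq_iff_eq]
        omega
      rw [h1, ih hB.2]
      simp [hML]

-- CORE: a stable sort by an Int key is the concatenation of its key buckets in increasing key order.
theorem pvBucket {α : Type} (key : α → Int) (xs : List α) :
    PySem.List.sorted xs key false =
      (PySem.List.sorted (PySem.Set.ofList (xs.map key)) (fun L => L) false).flatMap
        (fun L => xs.filter (fun x => key x == L)) := by
  have hBnodup : (PySem.List.sorted (PySem.Set.ofList (xs.map key)) (fun L => L) false).Nodup :=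
    (PySem.List.sorted_perm (PySem.Set.ofList (xs.map key)) (fun L => L) false).nodup_iff.mpr
      (PySem.Set.nodup_ofList _)
  apply pvUniq key
  · exact PySem.List.sorted_pairwise xs key
  · exact pvFlatMapPairwise key xs _ (PySem.List.sorted_ofList_pairwise_lt (xs.map key))
  · intro M
    rw [pvSortedFilterKey, pvFlatMapFilter key xs _ hBnodup M]
    by_cases hM : M ∈ PySem.List.sorted (PySem.Set.ofList (xs.map key)) (fun L => L) false
    · rw [if_pos hM]
    · rw [if_neg hM]
      apply List.filter_eq_nil_iff.mpr
      intro z hz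
      simp only [beq_iff_eq]
      intro he
      exact hM ((PySem.List.mem_sorted _ _ _ _).mpr
        ((PySem.Set.mem_ofList _ _).mpr (List.mem_map.mpr ⟨z, hz, he⟩)))

theorem Sort_codes_eq (n : List (String × String)) : Sort_codes n = Sort_codes_alt n := by
  unfold Sort_codes Sort_codes_alt
  dsimp only
  rw [pvRoundTrip]
  set sw := pvKeyToItem (PySem.Dict.ofList n) with hsw
  have hswB : (PySem.Dict.ofList n).items.foldl (fun sw p => sw.insert p.2 p.1) PySem.Dict.empty = sw := by
    rw [hsw]; rfl
  rw [hswB]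
  have hnd : sw.keys.Nodup := by
    rw [hsw]
    exact PySem.Dict.nodup_keys_foldl_insert_key (PySem.Dict.ofList n).items Prod.snd (fun _ p => p.1)
      PySem.Dict.empty (by simp [PySem.Dict.keys, PySem.Dict.empty])
  have hitems : sw.items = sw.keys.map (fun k => (k, sw.getD k "")) :=
    PySem.Dict.items_eq_map_keys sw hnd ""
  -- A's nested loops as a flatMap over the sorted keys
  simp only [PySem.List.foldl_append_if, PySem.List.foldl_append_eq_flatMap, List.nil_append]
  have hstep : ∀ i ∈ PySem.List.sorted sw.keys (fun s => PySem.Str.len s) false,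
      (sw.items.filter (fun p => i == p.1)).map (fun p => (p.2, i)) = [(sw.getD i "", i)] := by
    intro i hi
    have hik : i ∈ sw.keys := (PySem.List.mem_sorted _ _ _ _).mp hi
    have hmem : (i, sw.getD i "") ∈ sw.items := by
      rw [hitems]; exact List.mem_map.mpr ⟨i, hik, rfl⟩
    rw [pvFilterFst sw.items (by simpa [PySem.Dict.keys] using hnd) i (sw.getD i "") hmem]
    simp
  rw [List.flatMap_congr hstep]
  -- B's buckets dict: keys and contents
  have hbk : sw.items.foldl (fun b p => b.modify (PySem.Str.len p.1) [] (fun v => v ++ [(p.2, p.1)]))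
        (PySem.Dict.empty : PySem.Dict Int (List (String × String))) =
      (sw.items.map (fun p => (PySem.Str.len p.1, (p.2, p.1)))).foldl
        (fun b q => b.modify q.1 [] (fun v => v ++ [q.2])) PySem.Dict.empty := by
    rw [List.foldl_map]
  have hkeys : (sw.items.foldl (fun b p => b.modify (PySem.Str.len p.1) [] (fun v => v ++ [(p.2, p.1)]))
        (PySem.Dict.empty : PySem.Dict Int (List (String × String)))).keys =
      PySem.Set.ofList (sw.keys.map (fun k => PySem.Str.len k)) := by
    rw [PySem.Dict.keys_foldl_modify_key sw.items (fun p => PySem.Str.len p.1)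
        ([] : List (String × String)) (fun _ p v => v ++ [(p.2, p.1)]) PySem.Dict.empty]
    rw [PySem.Dict.keys_empty, hitems, List.map_map]
    rw [PySem.Set.ofList_eq_foldl]
    rfl
  have hget : ∀ L, (sw.items.foldl (fun b p => b.modify (PySem.Str.len p.1) [] (fun v => v ++ [(p.2, p.1)]))
        (PySem.Dict.empty : PySem.Dict Int (List (String × String)))).getD L [] =
      (sw.keys.filter (fun k => PySem.Str.len k == L)).map (fun k => (sw.getD k "", k)) := by
    intro L
    rw [hbk, PySem.Dict.getD_foldl_modify_append, PySem.Dict.getD_empty, List.nil_append, hitems]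
    simp [List.filter_map, List.map_map, Function.comp_def]
  rw [hkeys]
  simp only [hget]
  -- A's side: the stable sort as bucket concatenation
  rw [pvBucket (fun s => PySem.Str.len s) sw.keys, List.flatMap_assoc]
  apply List.flatMap_congr
  intro L _
  exact (List.map_eq_flatMap).symm

-- ===== VERDICT (by name: the statement is the Claim_ definition above) =====
theorem Sort_codes_spec : Claim_equal_Sort_codes := by
  intro n _
  exact Sort_codes_eq n
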